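-- pv_equiv track=rewrite | github.com/kousiknandy/projecteuler | 132.py | long_divisible
-- ===== SOURCE A (Python) =====
-- def long_divisible(p):
--     remainders = set()
--     numerator = 1
--     d = 1
--     while True:
--         while numerator < p:
--             numerator = numerator * 10 + 1
--             d += 1
--         remainder = numerator % p
--         if remainder == 0:
--             # so p divides 11..1 (d digits), does
--             # it divide 11....1 (10^9 digits)?
--             return 10**9 % d == 0
--         if remainder in remainders:
--             # results in recurring decimal
--             return False
--         remainders.add(remainder)
--         numerator = remainder
-- ===== SOURCE B (Python) =====
-- def long_divisible(p):
--     # R(10**9) mod p computed by modular exponentiation: R(n) = (10**n - 1) / 9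
--     return (pow(10, 10**9, 9 * p) - 1) // 9 % p == 0
-- ===== Notes on version B (the rewrite author's own statement) =====
-- stated objective: faster
-- what changed: Instead of long-dividing to find the length of the shortest repunit divisible by p (an O(p) remainder loop with cycle detection via a set), B computes the 10^9-digit repunit modulo p directly with one 3-argument pow: (pow(10, 10**9, 9*p) - 1) // 9 % p == 0.
-- outside the precondition, e.g. on long_divisible(-41): A returns False, B returns True; on long_divisible(-2): A returns False, B returns False
import Mathlib
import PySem

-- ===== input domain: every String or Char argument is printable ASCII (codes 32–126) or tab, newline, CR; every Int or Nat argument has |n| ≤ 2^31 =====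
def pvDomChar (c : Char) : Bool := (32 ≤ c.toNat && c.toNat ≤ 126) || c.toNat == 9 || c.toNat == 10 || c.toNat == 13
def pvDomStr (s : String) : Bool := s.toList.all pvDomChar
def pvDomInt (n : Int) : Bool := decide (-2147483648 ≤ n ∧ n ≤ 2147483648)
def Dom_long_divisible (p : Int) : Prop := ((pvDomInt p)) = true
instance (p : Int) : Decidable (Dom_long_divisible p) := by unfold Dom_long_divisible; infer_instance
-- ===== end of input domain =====

-- B replaces A's O(p) long-division/cycle-detection loop by one modular exponentiation
-- computing the 10^9-digit repunit modulo p; equivalence is proved for all p ≥ 1.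

-- ===== PORT A =====
-- inner `while numerator < p: numerator = numerator*10+1; d += 1` (fueled; the fuel
-- p.toNat+1 is proved sufficient on every state the program reaches under Pre_)
def innerA (p : Int) : Nat → Int → Int → Int × Int
  | 0, numerator, d => (numerator, d)
  | fuel + 1, numerator, d =>
    if numerator < p then innerA p fuel (numerator * 10 + 1) (d + 1)
    else (numerator, d)

-- outer `while True:` loop (fueled likewise; each pass adds a fresh remainder to the set)
def outerA (p : Int) : Nat → PySem.Set Int → Int → Int → Bool
  | 0, _, _, _ => false
  | fuel + 1, remainders, numerator, d =>
    match innerA p (p.toNat + 1) numerator d with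
    | (numerator', d') =>
      let remainder := PySem.Int.mod numerator' p
      if remainder = 0 then decide (PySem.Int.mod 1000000000 d' = 0)
      else if PySem.Set.contains remainders remainder then false
      else outerA p fuel (PySem.Set.add remainders remainder) remainder d'

def long_divisible (p : Int) : Bool :=
  outerA p (p.toNat + 1) PySem.Set.empty 1 1

-- ===== PORT B =====
-- Python's 3-argument pow(b, e, m), ported as CPython computes it (binary modular
-- exponentiation; extensionally equal to PySem.Int.powMod for m > 0 — lemma powmodBin_eq
-- below — which is not evaluable for this exponent). m = 0 is Python's ValueError path.
def powmodBin (b m : Int) (e : Nat) : Int :=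
  if m = 0 then 0
  else if he0 : e = 0 then PySem.Int.mod 1 m
  else
    let r := powmodBin b m (e / 2)
    let r2 := PySem.Int.mod (r * r) m
    if e % 2 = 1 then PySem.Int.mod (r2 * b) m else r2
termination_by e
decreasing_by exact Nat.div_lt_self (Nat.pos_of_ne_zero he0) (by norm_num)

def long_divisible_alt (p : Int) : Bool :=
  decide (PySem.Int.mod (PySem.Int.floordiv (powmodBin 10 (9 * p) 1000000000 - 1) 9) p = 0)

-- ===== PRECONDITION & SPEC =====
-- Pre_ excludes p = 0, where A raises ZeroDivisionError, and p < 0, which is outside the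
-- natural domain of this divisibility test (Project Euler 132 factors are positive); on
-- p ≤ -2 Python's negative remainders make A's cycle detection return False even when p
-- divides the repunit.
def Pre_long_divisible (p : Int) : Prop := 1 ≤ p
instance (p : Int) : Decidable (Pre_long_divisible p) := by unfold Pre_long_divisible; infer_instance

def pvWitness_long_divisible : Int := 7

def Spec_long_divisible (p : Int) (out : Bool) : Prop := out = long_divisible_alt p
instance (p : Int) (out : Bool) : Decidable (Spec_long_divisible p out) := by unfold Spec_long_divisible; infer_instance

-- ===== CLAIM (what is proved, stated in full; the proofs are below) =====
def Claim_equal_long_divisible : Prop := ∀ (p : Int), Dom_long_divisible p → Pre_long_divisible p → Spec_long_divisible p (long_divisible p)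

-- ===== LEMMAS AND PROOFS =====

-- the repunit with n ones
def rep : Nat → Int
  | 0 => 0
  | n + 1 => 10 * rep n + 1

lemma nine_rep (n : Nat) : 9 * rep n + 1 = 10 ^ n := by
  induction n with
  | zero => simp [rep]
  | succ n ih => rw [rep, pow_succ]; linarith

lemma rep_add (a b : Nat) : rep (a + b) = rep a * 10 ^ b + rep b := by
  induction b with
  | zero => simp [rep]
  | succ b ih =>
    have : a + (b + 1) = (a + b) + 1 := by omega
    rw [this, rep, ih, rep, pow_succ]; ring

lemma dvd_rep_mul (p : Int) (d k : Nat) (h : p ∣ rep d) : p ∣ rep (k * d) := by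
  induction k with
  | zero => simp [rep]
  | succ k ih =>
    have : (k + 1) * d = k * d + d := by ring
    rw [this, rep_add]
    exact dvd_add (ih.mul_right _) h

lemma dvd_rep_mod (p : Int) (d n : Nat) (hd : p ∣ rep d) (hn : p ∣ rep n) :
    p ∣ rep (n % d) := by
  have h1 : (n / d) * d + n % d = n := Nat.div_add_mod' n d
  have h2 : rep n = rep ((n / d) * d) * 10 ^ (n % d) + rep (n % d) := by
    conv_lhs => rw [← h1]
    exact rep_add _ _
  have h3 : p ∣ rep ((n / d) * d) := dvd_rep_mul p d _ hd
  have := dvd_sub hn (h3.mul_right (10 ^ (n % d)))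
  rwa [h2, add_sub_cancel_left] at this

lemma step_mod (p x y : Int) (h : x % p = y % p) :
    (10 * x + 1) % p = (10 * y + 1) % p := by
  have hx : Int.ModEq p x y := h
  exact (hx.mul_left 10).add_right 1

lemma m_succ (p : Int) (e : Nat) : rep (e + 1) % p = (10 * (rep e % p) + 1) % p := by
  rw [rep]
  exact step_mod p _ _ (Int.emod_emod_of_dvd _ dvd_rfl).symm

lemma m_shift (p : Int) (a b : Nat) (h : rep a % p = rep b % p) :
    ∀ j : Nat, rep (a + j) % p = rep (b + j) % p := by
  intro j
  induction j with
  | zero => simpa using h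
  | succ j ih =>
    have ha : a + (j + 1) = (a + j) + 1 := by omega
    have hb : b + (j + 1) = (b + j) + 1 := by omega
    rw [ha, hb, m_succ, m_succ, ih]

-- once a remainder repeats, no repunit is ever divisible by p
lemma no_zero_of_cycle (p : Int) (e0 d2 : Nat) (he1 : 1 ≤ e0) (helt : e0 < d2)
    (hcyc : rep e0 % p = rep d2 % p)
    (h0 : ∀ e, 1 ≤ e → e < d2 → rep e % p ≠ 0) :
    ∀ e, 1 ≤ e → rep e % p ≠ 0 := by
  intro e
  induction e using Nat.strong_induction_on with
  | _ e ih =>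
    intro he
    by_cases hlt : e < d2
    · exact h0 e he hlt
    · have hj : e = d2 + (e - d2) := by omega
      rw [hj, ← m_shift p e0 d2 hcyc (e - d2)]
      exact ih (e0 + (e - d2)) (by omega) (by omega)

lemma set_len_lt (p : Int) (hp : 2 ≤ p) (S : List Int) (hnd : S.Nodup)
    (hmem : ∀ x ∈ S, 0 < x ∧ x < p) : S.length < p.toNat := by
  have hsub : S.toFinset ⊆ Finset.Ioo (0 : Int) p := by
    intro x hx
    rw [List.mem_toFinset] at hx
    simpa [Finset.mem_Ioo] using hmem x hx
  have hcard := Finset.card_le_card hsub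
  rw [List.toFinset_card_of_nodup hnd, Int.card_Ioo] at hcard
  omega

lemma innerA_spec (p : Int) :
    ∀ (fuel : Nat) (v : Int) (dn : Nat), 1 ≤ v → v % p = rep dn % p →
      (p - v).toNat ≤ fuel →
      ∃ (w : Int) (dn' : Nat), innerA p fuel v (dn : Int) = (w, (dn' : Int)) ∧
        dn ≤ dn' ∧ p ≤ w ∧ 1 ≤ w ∧ w % p = rep dn' % p ∧
        (∀ e, dn ≤ e → e < dn' → rep e % p ≠ 0) ∧ (v < p → dn < dn') := by
  intro fuel
  induction fuel with
  | zero =>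
    intro v dn h1 hm hf
    have hpv : p ≤ v := by omega
    exact ⟨v, dn, rfl, le_refl _, hpv, h1, hm, fun e h1 h2 => by omega, fun h => absurd h (by omega)⟩
  | succ fuel ih =>
    intro v dn h1 hm hf
    by_cases hvp : v < p
    · have hstep : innerA p (fuel + 1) v (dn : Int) = innerA p fuel (v * 10 + 1) ((dn : Int) + 1) := by
        simp [innerA, hvp]
      have hcast : ((dn : Int) + 1) = ((dn + 1 : Nat) : Int) := by push_cast; ring
      have hm' : (v * 10 + 1) % p = rep (dn + 1) % p := by
        rw [m_succ, ← hm]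
        have : v * 10 + 1 = 10 * v + 1 := by ring
        rw [this]
        exact step_mod p v (v % p) (Int.emod_emod_of_dvd _ dvd_rfl).symm
      obtain ⟨w, dn', heq, hle, hpw, h1w, hwm, hmid, _⟩ :=
        ih (v * 10 + 1) (dn + 1) (by omega) hm' (by omega)
      refine ⟨w, dn', by rw [hstep, hcast]; exact heq, by omega, hpw, h1w, hwm, ?_, by omega⟩
      intro e hde hed
      by_cases hedn : e = dn
      · subst hedn
        have hv : v % p = v := Int.emod_eq_of_lt (by omega) hvp
        rw [← hm, hv]; omega
      · exact hmid e (by omega) hed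
    · have hstep : innerA p (fuel + 1) v (dn : Int) = (v, (dn : Int)) := by
        simp [innerA, hvp]
      exact ⟨v, dn, hstep, le_refl _, by omega, h1, hm, fun e h1 h2 => by omega,
        fun h => absurd h hvp⟩

lemma outerA_spec (p : Int) (hp : 2 ≤ p) :
    ∀ (fuel : Nat) (S : PySem.Set Int) (v : Int) (dn : Nat),
      1 ≤ v → v < p → v = rep dn % p → 1 ≤ dn →
      (∀ e, 1 ≤ e → e ≤ dn → rep e % p ≠ 0) →
      (∀ x ∈ S, ∃ e, 1 ≤ e ∧ e ≤ dn ∧ x = rep e % p) →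
      S.Nodup →
      p.toNat ≤ fuel + S.length →
      outerA p fuel S v (dn : Int) = decide (rep 1000000000 % p = 0) := by
  intro fuel
  induction fuel with
  | zero =>
    intro S v dn h1 hvp hvm hd1 hI3 hI4 hnd hfuel
    exfalso
    have : S.length < p.toNat := by
      apply set_len_lt p hp S hnd
      intro x hx
      obtain ⟨e, he1, hed, hxe⟩ := hI4 x hx
      have hne := hI3 e he1 hed
      have h0 : 0 ≤ rep e % p := Int.emod_nonneg _ (by omega)
      have hl : rep e % p < p := Int.emod_lt_of_pos _ (by omega)
      subst hxe
      exact ⟨by omega, hl⟩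
    omega
  | succ fuel ih =>
    intro S v dn h1 hvp hvm hd1 hI3 hI4 hnd hfuel
    obtain ⟨w, dn', heq, hle, hpw, h1w, hwm, hmid, hlt⟩ :=
      innerA_spec p (p.toNat + 1) v dn h1 (by rw [Int.emod_eq_of_lt (by omega) hvp, hvm]) (by omega)
    have hdlt : dn < dn' := hlt hvp
    have hrem : PySem.Int.mod w p = rep dn' % p := by
      rw [PySem.Int.mod_eq_emod_of_pos (by omega), hwm]
    have hI3' : ∀ e, 1 ≤ e → e < dn' → rep e % p ≠ 0 := by
      intro e he1 hed
      by_cases h : e ≤ dn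
      · exact hI3 e he1 h
      · exact hmid e (by omega) hed
    rw [outerA, heq]
    simp only
    by_cases hz : PySem.Int.mod w p = 0
    · rw [if_pos hz]
      have hdvd : p ∣ rep dn' := by
        rw [hrem] at hz
        exact Int.dvd_of_emod_eq_zero hz
      have hiff : PySem.Int.mod 1000000000 (dn' : Int) = 0 ↔ rep 1000000000 % p = 0 := by
        rw [PySem.Int.mod_eq_zero_iff_dvd]
        constructor
        · intro hdn
          have : (dn' : Nat) ∣ 1000000000 := by exact_mod_cast hdn
          obtain ⟨k, hk⟩ := this
          have : rep 1000000000 = rep (k * dn') := by rw [hk]; ring_nf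
          rw [this]
          exact Int.emod_eq_zero_of_dvd (dvd_rep_mul p dn' k hdvd)
        · intro hN
          have hNdvd : p ∣ rep 1000000000 := Int.dvd_of_emod_eq_zero hN
          have hmod : p ∣ rep (1000000000 % dn') := dvd_rep_mod p dn' _ hdvd hNdvd
          have hlt' : 1000000000 % dn' < dn' := Nat.mod_lt _ (by omega)
          by_cases h0 : 1000000000 % dn' = 0
          · exact_mod_cast Int.natCast_dvd_natCast.mpr (Nat.dvd_of_mod_eq_zero h0)
          · exact absurd (Int.emod_eq_zero_of_dvd hmod) (hI3' _ (by omega) hlt')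
      simp [hiff]
    · rw [if_neg hz]
      by_cases hin : PySem.Set.contains S (PySem.Int.mod w p)
      · rw [if_pos hin]
        have hmem : PySem.Int.mod w p ∈ S := (PySem.Set.contains_iff _ _).mp hin
        obtain ⟨e0, he1, hed, hxe⟩ := hI4 _ hmem
        have hcyc : rep e0 % p = rep dn' % p := by rw [← hxe, hrem]
        have hnz : ∀ e, 1 ≤ e → rep e % p ≠ 0 := by
          apply no_zero_of_cycle p e0 dn' he1 (by omega) hcyc
          exact hI3'
        have := hnz 1000000000 (by omega)
        simp [this]
      · rw [if_neg hin]
        have hnotmem : PySem.Int.mod w p ∉ S := fun h => hin ((PySem.Set.contains_iff _ _).mpr h)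
        have hr0 : 0 ≤ PySem.Int.mod w p := by
          rw [hrem]; exact Int.emod_nonneg _ (by omega)
        have hrp : PySem.Int.mod w p < p := by
          rw [hrem]; exact Int.emod_lt_of_pos _ (by omega)
        have hadd : PySem.Set.add S (PySem.Int.mod w p) = S ++ [PySem.Int.mod w p] :=
          PySem.Set.add_of_not_mem hnotmem
        have happ : (PySem.Set.add S (PySem.Int.mod w p)).length = S.length + 1 := by
          rw [hadd]; simp
        have hres := ih (PySem.Set.add S (PySem.Int.mod w p)) (PySem.Int.mod w p) dn'
          (by omega) hrp hrem (by omega)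
          (by
            intro e he1 hed
            by_cases h : e = dn'
            · subst h; rw [← hrem]; exact hz
            · exact hI3' e he1 (by omega))
          (by
            intro x hx
            rw [hadd, List.mem_append] at hx
            rcases hx with hx | hx
            · obtain ⟨e, a, b, c⟩ := hI4 x hx
              exact ⟨e, a, by omega, c⟩
            · simp at hx
              exact ⟨dn', by omega, le_refl _, by rw [hx, hrem]⟩)
          (by
            rw [hadd]
            exact List.Nodup.append hnd (List.nodup_singleton _)
              (by simpa using hnotmem))
          (by omega)
        exact hres

lemma rep_one_mod (p : Int) (hp : 2 ≤ p) : rep 1 % p = 1 := by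
  have : rep 1 = 1 := by simp [rep]
  rw [this]
  exact Int.emod_eq_of_lt (by omega) (by omega)

lemma powmodBin_eq (b m : Int) (hm : 0 < m) : ∀ e : Nat, powmodBin b m e = b ^ e % m := by
  intro e
  induction e using Nat.strong_induction_on with
  | _ e ih =>
    by_cases h0 : e = 0
    · subst h0
      rw [powmodBin]
      simp [hm.ne', PySem.Int.mod_eq_emod_of_pos hm]
    · rw [powmodBin]
      rw [if_neg hm.ne', dif_neg h0]
      simp only [ih (e / 2) (Nat.div_lt_self (Nat.pos_of_ne_zero h0) (by norm_num)),
        PySem.Int.mod_eq_emod_of_pos hm]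
      have hr2 : b ^ (e / 2) % m * (b ^ (e / 2) % m) % m = b ^ (e / 2 + e / 2) % m := by
        rw [← Int.mul_emod, pow_add]
      by_cases hpar : e % 2 = 1
      · rw [if_pos hpar, hr2]
        have hmul : b ^ (e / 2 + e / 2) % m * b % m = b ^ (e / 2 + e / 2) * b % m :=
          Int.ModEq.mul_right b (Int.emod_emod_of_dvd _ dvd_rfl)
        rw [hmul, ← pow_succ]
        have he : e / 2 + e / 2 + 1 = e := by omega
        rw [he]
      · rw [if_neg hpar, hr2]
        have he : e / 2 + e / 2 = e := by omega
        rw [he]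

-- B computes rep(10^9) mod p
lemma alt_eq (p : Int) (hp : 1 ≤ p) :
    long_divisible_alt p = decide (rep 1000000000 % p = 0) := by
  unfold long_divisible_alt
  obtain ⟨M, hM⟩ : ∃ M : Int, 10 ^ 1000000000 = M := ⟨_, rfl⟩
  have h9p : (0 : Int) < 9 * p := by omega
  have hx : powmodBin 10 (9 * p) 1000000000 = M % (9 * p) := by
    rw [powmodBin_eq 10 (9 * p) h9p, hM]
  have hrepN : 9 * rep 1000000000 + 1 = M := by rw [← hM]; exact nine_rep 1000000000
  set x := powmodBin 10 (9 * p) 1000000000 with hxdef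
  clear hM hxdef
  have hx0 : 0 ≤ x := by rw [hx]; exact Int.emod_nonneg _ (by omega)
  have hxlt : x < 9 * p := by rw [hx]; exact Int.emod_lt_of_pos _ h9p
  have hx9 : x % 9 = 1 := by
    rw [hx, Int.emod_emod_of_dvd _ ⟨p, rfl⟩, ← hrepN]
    have h : 9 * rep 1000000000 + 1 = 1 + rep 1000000000 * 9 := by ring
    rw [h, Int.add_mul_emod_self_right]
    decide
  have hdvd : (9 : Int) ∣ x - 1 := by omega
  obtain ⟨y, hy⟩ := hdvd
  have hfd : PySem.Int.floordiv (x - 1) 9 = y := by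
    rw [PySem.Int.floordiv_eq_ediv_of_pos (by norm_num), hy,
      Int.mul_ediv_cancel_left _ (by norm_num)]
  have hy0 : 0 ≤ y := by omega
  have hyp : y < p := by omega
  obtain ⟨Q, hQ⟩ : ∃ Q : Int, p * (M / (9 * p)) = Q := ⟨_, rfl⟩
  have hq := Int.mul_ediv_add_emod M (9 * p)
  rw [mul_assoc, hQ] at hq
  have hx' : M % (9 * p) = x := hx.symm
  have hkey : rep 1000000000 = Q + y := by omega
  have hrepmod : rep 1000000000 % p = y := by
    rw [hkey, ← hQ]
    have h : p * (M / (9 * p)) + y = y + (M / (9 * p)) * p := by ring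
    rw [h, Int.add_mul_emod_self_right]
    exact Int.emod_eq_of_lt hy0 hyp
  rw [hfd, PySem.Int.mod_eq_emod_of_pos (by omega), hrepmod,
    Int.emod_eq_of_lt hy0 hyp]

-- ===== VERDICT (by name: the statement is the Claim_ definition above) =====
theorem long_divisible_spec : Claim_equal_long_divisible := by
  intro p _ hpre
  have hp1 : 1 ≤ p := hpre
  show long_divisible p = long_divisible_alt p
  by_cases hp : p = 1
  · subst hp
    have hA : long_divisible 1 = true := by decide
    rw [hA, alt_eq 1 (by omega)]
    simp
  · have hp2 : 2 ≤ p := by omega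
    rw [alt_eq p hp1]
    unfold long_divisible
    have := outerA_spec p hp2 (p.toNat + 1) PySem.Set.empty 1 1
      (by omega) (by omega) (rep_one_mod p hp2).symm (by omega)
      (by
        intro e he1 hed
        have : e = 1 := by omega
        subst this
        rw [rep_one_mod p hp2]; omega)
      (by intro x hx; simp [PySem.Set.empty] at hx)
      (by simp [PySem.Set.empty])
      (by simp [PySem.Set.empty])
    simpa using this
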